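-- pv_equiv track=rewrite | github.com/cjackett/ai-safety | experiments/02_jailbreak_testing/run_jailbreak_tests.py | _calculate_model_stats
-- ===== SOURCE A (Python) =====
-- from collections import Counter, defaultdict
-- from typing import Any
--
-- def _calculate_model_stats(results: list[dict[str, Any]]) -> dict[str, dict[str, int]]:
--     """
--     Calculate statistics per model from test results.
--
--     Args:
--         results: List of test results
--
--     Returns:
--         Dictionary mapping model names to their statistics
--     """
--     models: dict[str, dict[str, int]] = defaultdict(
--         lambda: {
--             "total": 0,
--             "refused": 0,
--             "hedged": 0,
--             "full": 0,
--             "errors": 0,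
--         },
--     )
--
--     for result in results:
--         if result.get("error"):
--             models[result["model"]]["errors"] += 1
--             continue
--
--         models[result["model"]]["total"] += 1
--
--         compliance = result.get("compliance_type")
--         if compliance == "refused":
--             models[result["model"]]["refused"] += 1
--         elif compliance == "hedged":
--             models[result["model"]]["hedged"] += 1
--         elif compliance == "full":
--             models[result["model"]]["full"] += 1
--
--     return models
-- ===== SOURCE B (Python) =====
-- from collections import Counter, defaultdict
-- from typing import Any
--
--
-- def _calculate_model_stats(results: list[dict[str, Any]]) -> dict[str, dict[str, int]]:
--     """Group results by model once, then compute each model's stats from its group."""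
--     index: dict[str, list[dict[str, Any]]] = defaultdict(list)
--     for result in results:
--         index[result["model"]].append(result)
--
--     models: dict[str, dict[str, int]] = defaultdict(
--         lambda: {
--             "total": 0,
--             "refused": 0,
--             "hedged": 0,
--             "full": 0,
--             "errors": 0,
--         },
--     )
--     for model, entries in index.items():
--         ok = [r for r in entries if not r.get("error")]
--         counts = Counter(r.get("compliance_type") for r in ok)
--         models[model] = {
--             "total": len(ok),
--             "refused": counts["refused"],
--             "hedged": counts["hedged"],
--             "full": counts["full"],
--             "errors": len(entries) - len(ok),
--         }
--     return models
-- ===== Notes on version B (the rewrite author's own statement) =====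
-- stated objective: alternative
-- what changed: B first builds a model->entries index in one grouping pass, then derives each model's five statistics from its group (filter for non-errors, Counter over compliance types, subtraction for errors) instead of A's single pass of per-field increments on a defaultdict of counters.
import Mathlib
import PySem

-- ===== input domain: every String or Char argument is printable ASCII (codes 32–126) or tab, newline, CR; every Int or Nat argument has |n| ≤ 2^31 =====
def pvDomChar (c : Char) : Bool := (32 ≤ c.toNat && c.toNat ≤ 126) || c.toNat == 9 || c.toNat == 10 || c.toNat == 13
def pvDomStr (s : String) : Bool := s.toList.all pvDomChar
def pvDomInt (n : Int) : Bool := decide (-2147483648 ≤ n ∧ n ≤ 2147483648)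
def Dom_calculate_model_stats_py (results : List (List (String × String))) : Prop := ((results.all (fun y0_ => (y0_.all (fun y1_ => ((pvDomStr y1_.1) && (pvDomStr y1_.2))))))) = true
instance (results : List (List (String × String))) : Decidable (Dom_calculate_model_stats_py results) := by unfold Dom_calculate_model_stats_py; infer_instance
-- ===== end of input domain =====

-- B groups results by model first and computes stats per group; same return value as A on Pre_.

-- key of a result: result["model"] (Pre_ guarantees the key is present, so getD is exact)
def pvKey (r : List (String × String)) : String := (PySem.Dict.mk r).getD "model" ""
-- truthiness of result.get("error"): missing or "" is falsy
def pvErr (r : List (String × String)) : Bool := (PySem.Dict.mk r).getD "error" "" != ""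

-- ===== PORT A =====
def pvStats0 : PySem.Dict String Int :=
  PySem.Dict.mk [("total", 0), ("refused", 0), ("hedged", 0), ("full", 0), ("errors", 0)]

-- models[m][f] += 1  on the defaultdict 'models'
def pvBump (models : PySem.Dict String (PySem.Dict String Int)) (m f : String) :
    PySem.Dict String (PySem.Dict String Int) :=
  models.insert m ((models.getD m pvStats0).modify f 0 (· + 1))

def pvAStep (models : PySem.Dict String (PySem.Dict String Int)) (result : List (String × String)) :
    PySem.Dict String (PySem.Dict String Int) :=
  let m := pvKey result
  if pvErr result then
    pvBump models m "errors"
  else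
    let models := pvBump models m "total"
    let compliance := (PySem.Dict.mk result).get? "compliance_type"
    if compliance = some "refused" then pvBump models m "refused"
    else if compliance = some "hedged" then pvBump models m "hedged"
    else if compliance = some "full" then pvBump models m "full"
    else models

def calculate_model_stats_py (results : List (List (String × String))) : List (String × List (String × Int)) :=
  ((results.foldl pvAStep PySem.Dict.empty).items.map (fun p => (p.1, p.2.items)))

-- ===== PORT B =====
-- stats of one model's group of entries
def pvGroupStats (entries : List (List (String × String))) : List (String × Int) :=
  let ok := entries.filter (fun r => !pvErr r)
  let counts := PySem.Dict.counter (ok.map (fun r => (PySem.Dict.mk r).get? "compliance_type"))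
  [("total", (ok.length : Int)),
   ("refused", counts.getD (some "refused") 0),
   ("hedged", counts.getD (some "hedged") 0),
   ("full", counts.getD (some "full") 0),
   ("errors", ((entries.length : Int) - (ok.length : Int)))]

def calculate_model_stats_py_alt (results : List (List (String × String))) : List (String × List (String × Int)) :=
  let index : PySem.Dict String (List (List (String × String))) :=
    results.foldl (fun d r => d.modify (pvKey r) [] (· ++ [r])) PySem.Dict.empty
  let models : PySem.Dict String (PySem.Dict String Int) :=
    index.items.foldl (fun ms p => ms.insert p.1 (PySem.Dict.mk (pvGroupStats p.2))) PySem.Dict.empty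
  models.items.map (fun p => (p.1, p.2.items))

-- ===== PRECONDITION & SPEC =====
-- Pre_ excludes exactly the results lacking a "model" key: there A (and B) raise KeyError.
def Pre_calculate_model_stats_py (results : List (List (String × String))) : Prop :=
  ∀ r ∈ results, (PySem.Dict.mk r).contains "model" = true
instance (results : List (List (String × String))) : Decidable (Pre_calculate_model_stats_py results) := by unfold Pre_calculate_model_stats_py; infer_instance
def pvWitness_calculate_model_stats_py : (List (List (String × String))) :=
  [[("model", "m1"), ("compliance_type", "refused")], [("model", "m1"), ("error", "boom")]]

def Spec_calculate_model_stats_py (results : List (List (String × String))) (out : List (String × List (String × Int))) : Prop := out = calculate_model_stats_py_alt results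
instance (results : List (List (String × String))) (out : List (String × List (String × Int))) : Decidable (Spec_calculate_model_stats_py results out) := by unfold Spec_calculate_model_stats_py; infer_instance

-- ===== CLAIM (what is proved, stated in full; the proofs are below) =====
def Claim_equal_calculate_model_stats_py : Prop := ∀ (results : List (List (String × String))), Dom_calculate_model_stats_py results → Pre_calculate_model_stats_py results → Spec_calculate_model_stats_py results (calculate_model_stats_py results)

-- ===== LEMMAS AND PROOFS =====


-- B's grouping step
def pvBStep (d : PySem.Dict String (List (List (String × String)))) (r : List (String × String)) :
    PySem.Dict String (List (List (String × String))) :=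
  d.modify (pvKey r) [] (· ++ [r])

-- render a grouping index as A's dict of per-model stat dicts
def pvRender (idx : PySem.Dict String (List (List (String × String)))) :
    PySem.Dict String (PySem.Dict String Int) :=
  PySem.Dict.mk (idx.items.map (fun p => (p.1, PySem.Dict.mk (pvGroupStats p.2))))

theorem pv_get?_mk_map {α β : Type} (g : α → β) (l : List (String × α)) (k : String) :
    (PySem.Dict.mk (l.map (fun p => (p.1, g p.2)))).get? k = ((PySem.Dict.mk l).get? k).map g := by
  induction l with
  | nil => rfl
  | cons p t ih =>
    obtain ⟨k', v'⟩ := p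
    rw [show ((((k', v') :: t).map (fun p => (p.1, g p.2)))) = (k', g v') :: t.map (fun p => (p.1, g p.2)) from rfl,
      PySem.Dict.get?_mk_cons, PySem.Dict.get?_mk_cons]
    by_cases h : k' == k
    · rw [if_pos h, if_pos h]; rfl
    · rw [if_neg h, if_neg h]; exact ih

theorem pv_contains_mk_map {α β : Type} (g : α → β) (l : List (String × α)) (k : String) :
    (PySem.Dict.mk (l.map (fun p => (p.1, g p.2)))).contains k = (PySem.Dict.mk l).contains k := by
  rw [PySem.Dict.contains_eq_isSome_get?, PySem.Dict.contains_eq_isSome_get?, pv_get?_mk_map]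
  cases (PySem.Dict.mk l).get? k <;> rfl

theorem pv_insert_mk_map {α β : Type} (g : α → β) (l : List (String × α)) (k : String) (v : α) :
    (PySem.Dict.mk (l.map (fun p => (p.1, g p.2)))).insert k (g v)
      = PySem.Dict.mk (((PySem.Dict.mk l).insert k v).items.map (fun p => (p.1, g p.2))) := by
  apply PySem.Dict.ext
  show ((PySem.Dict.mk (l.map (fun p => (p.1, g p.2)))).insert k (g v)).items
      = ((PySem.Dict.mk l).insert k v).items.map (fun p => (p.1, g p.2))
  rw [PySem.Dict.items_insert, PySem.Dict.items_insert, pv_contains_mk_map]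
  by_cases h : (PySem.Dict.mk l).contains k
  · simp only [h, if_true]
    show (l.map (fun p => (p.1, g p.2))).map (fun p => if p.1 == k then (k, g v) else p)
        = (l.map (fun p => if p.1 == k then (k, v) else p)).map (fun p => (p.1, g p.2))
    rw [List.map_map, List.map_map]
    apply List.map_congr_left
    intro p _
    by_cases hp : p.1 = k <;> simp [hp]
  · simp only [h]
    show (l.map (fun p => (p.1, g p.2))) ++ [(k, g v)] = (l ++ [(k, v)]).map (fun p => (p.1, g p.2))
    simp

theorem pv_render_get? (idx : PySem.Dict String (List (List (String × String)))) (m : String) :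
    (pvRender idx).get? m = (idx.get? m).map (fun e => PySem.Dict.mk (pvGroupStats e)) :=
  pv_get?_mk_map (fun e => PySem.Dict.mk (pvGroupStats e)) idx.items m

theorem pv_stats0_eq : PySem.Dict.mk (pvGroupStats []) = pvStats0 := rfl

theorem pv_render_getD (idx : PySem.Dict String (List (List (String × String)))) (m : String) :
    (pvRender idx).getD m pvStats0 = PySem.Dict.mk (pvGroupStats (idx.getD m [])) := by
  rw [PySem.Dict.getD_eq_get?_getD, PySem.Dict.getD_eq_get?_getD, pv_render_get?]
  cases h : idx.get? m
  · simp [pv_stats0_eq]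
  · simp

theorem pv_render_insert (idx : PySem.Dict String (List (List (String × String))))
    (m : String) (e : List (List (String × String))) :
    pvRender (idx.insert m e) = (pvRender idx).insert m (PySem.Dict.mk (pvGroupStats e)) :=
  (pv_insert_mk_map (fun e => PySem.Dict.mk (pvGroupStats e)) idx.items m e).symm

-- the per-field increments on a literal stats dict
theorem pv_bump_total (t rr h f er : Int) :
    (PySem.Dict.mk [("total",t),("refused",rr),("hedged",h),("full",f),("errors",er)]).modify "total" 0 (· + 1)
      = PySem.Dict.mk [("total",t+1),("refused",rr),("hedged",h),("full",f),("errors",er)] := rfl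
theorem pv_bump_refused (t rr h f er : Int) :
    (PySem.Dict.mk [("total",t),("refused",rr),("hedged",h),("full",f),("errors",er)]).modify "refused" 0 (· + 1)
      = PySem.Dict.mk [("total",t),("refused",rr+1),("hedged",h),("full",f),("errors",er)] := rfl
theorem pv_bump_hedged (t rr h f er : Int) :
    (PySem.Dict.mk [("total",t),("refused",rr),("hedged",h),("full",f),("errors",er)]).modify "hedged" 0 (· + 1)
      = PySem.Dict.mk [("total",t),("refused",rr),("hedged",h+1),("full",f),("errors",er)] := rfl
theorem pv_bump_full (t rr h f er : Int) :
    (PySem.Dict.mk [("total",t),("refused",rr),("hedged",h),("full",f),("errors",er)]).modify "full" 0 (· + 1)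
      = PySem.Dict.mk [("total",t),("refused",rr),("hedged",h),("full",f+1),("errors",er)] := rfl
theorem pv_bump_errors (t rr h f er : Int) :
    (PySem.Dict.mk [("total",t),("refused",rr),("hedged",h),("full",f),("errors",er)]).modify "errors" 0 (· + 1)
      = PySem.Dict.mk [("total",t),("refused",rr),("hedged",h),("full",f),("errors",er+1)] := rfl

-- appending one entry to a group updates its stats exactly as A's per-result branch does
theorem pv_group_append (e : List (List (String × String))) (r : List (String × String)) :
    PySem.Dict.mk (pvGroupStats (e ++ [r]))
      = if pvErr r then
          (PySem.Dict.mk (pvGroupStats e)).modify "errors" 0 (· + 1)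
        else if (PySem.Dict.mk r).get? "compliance_type" = some "refused" then
          ((PySem.Dict.mk (pvGroupStats e)).modify "total" 0 (· + 1)).modify "refused" 0 (· + 1)
        else if (PySem.Dict.mk r).get? "compliance_type" = some "hedged" then
          ((PySem.Dict.mk (pvGroupStats e)).modify "total" 0 (· + 1)).modify "hedged" 0 (· + 1)
        else if (PySem.Dict.mk r).get? "compliance_type" = some "full" then
          ((PySem.Dict.mk (pvGroupStats e)).modify "total" 0 (· + 1)).modify "full" 0 (· + 1)
        else
          (PySem.Dict.mk (pvGroupStats e)).modify "total" 0 (· + 1) := by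
  simp only [pvGroupStats, List.filter_append, List.length_append]
  by_cases herr : pvErr r
  · rw [if_pos herr, pv_bump_errors]
    have hfil : List.filter (fun r => !pvErr r) [r] = [] := by simp [herr]
    apply PySem.Dict.ext
    simp [hfil]
    omega
  · rw [if_neg herr]
    have hfil : List.filter (fun r => !pvErr r) [r] = [r] := by simp [herr]
    rw [hfil]
    by_cases h1 : (PySem.Dict.mk r).get? "compliance_type" = some "refused"
    · rw [if_pos h1, pv_bump_total, pv_bump_refused]
      apply PySem.Dict.ext
      simp [PySem.Dict.getD_counter, List.count_append, h1]
    · rw [if_neg h1]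
      by_cases h2 : (PySem.Dict.mk r).get? "compliance_type" = some "hedged"
      · rw [if_pos h2, pv_bump_total, pv_bump_hedged]
        apply PySem.Dict.ext
        simp [PySem.Dict.getD_counter, List.count_append, h2]
      · rw [if_neg h2]
        by_cases h3 : (PySem.Dict.mk r).get? "compliance_type" = some "full"
        · rw [if_pos h3, pv_bump_total, pv_bump_full]
          apply PySem.Dict.ext
          simp [PySem.Dict.getD_counter, List.count_append, h3]
        · rw [if_neg h3, pv_bump_total]
          apply PySem.Dict.ext
          simp [PySem.Dict.getD_counter, List.count_append, h1, h2, h3]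

theorem pv_step (idx : PySem.Dict String (List (List (String × String)))) (r : List (String × String)) :
    pvAStep (pvRender idx) r = pvRender (pvBStep idx r) := by
  have hmod : pvBStep idx r = idx.insert (pvKey r) (idx.getD (pvKey r) [] ++ [r]) := rfl
  rw [hmod, pv_render_insert, pv_group_append]
  simp only [pvAStep, pvBump, pv_render_getD]
  by_cases herr : pvErr r
  · rw [if_pos herr, if_pos herr]
  · rw [if_neg herr, if_neg herr]
    simp only [PySem.Dict.getD_insert_self]
    by_cases h1 : (PySem.Dict.mk r).get? "compliance_type" = some "refused"
    · rw [if_pos h1, if_pos h1, PySem.Dict.insert_insert_self]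
    · rw [if_neg h1, if_neg h1]
      by_cases h2 : (PySem.Dict.mk r).get? "compliance_type" = some "hedged"
      · rw [if_pos h2, if_pos h2, PySem.Dict.insert_insert_self]
      · rw [if_neg h2, if_neg h2]
        by_cases h3 : (PySem.Dict.mk r).get? "compliance_type" = some "full"
        · rw [if_pos h3, if_pos h3, PySem.Dict.insert_insert_self]
        · rw [if_neg h3, if_neg h3]

theorem pv_main (results : List (List (String × String))) :
    calculate_model_stats_py results = calculate_model_stats_py_alt results := by
  have hnodup : ((results.foldl pvBStep PySem.Dict.empty).items.map (·.1)).Nodup := by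
    have hkeys : (results.foldl pvBStep PySem.Dict.empty).keys
        = PySem.Set.update (PySem.Dict.empty : PySem.Dict String (List (List (String × String)))).keys (results.map pvKey) :=
      PySem.Dict.keys_foldl_modify_key results pvKey [] (fun _ r => (· ++ [r])) PySem.Dict.empty
    show (results.foldl pvBStep PySem.Dict.empty).keys.Nodup
    rw [hkeys, PySem.Dict.keys_empty, PySem.Set.update_nil_left]
    exact PySem.Set.nodup_ofList _
  have hitems := PySem.Dict.items_foldl_insert_fresh
      (results.foldl pvBStep PySem.Dict.empty).items (·.1) (fun p => PySem.Dict.mk (pvGroupStats p.2))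
      PySem.Dict.empty (fun _ _ => PySem.Dict.contains_empty _) hnodup
  have hA : calculate_model_stats_py results
      = ((pvRender (results.foldl pvBStep PySem.Dict.empty)).items.map (fun p => (p.1, p.2.items))) := by
    unfold calculate_model_stats_py
    rw [show (PySem.Dict.empty : PySem.Dict String (PySem.Dict String Int)) = pvRender PySem.Dict.empty from rfl,
      List.foldl_hom pvRender pv_step]
  have hB : calculate_model_stats_py_alt results
      = (((results.foldl pvBStep PySem.Dict.empty).items.foldl
            (fun ms p => ms.insert p.1 (PySem.Dict.mk (pvGroupStats p.2))) PySem.Dict.empty).items.map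
          (fun p => (p.1, p.2.items))) := rfl
  rw [hA, hB, hitems]
  rfl

-- ===== VERDICT =====

theorem calculate_model_stats_py_spec : Claim_equal_calculate_model_stats_py := by
  intro results _ _
  unfold Spec_calculate_model_stats_py
  exact pv_main results
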